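-- pv_equiv track=rewrite | github.com/qlalfdmlghk1/CodingTest_Python | boj/다시풀어보기/1285.py | solution
-- ===== SOURCE A (Python) =====
-- def count_tails(coin, n):
--     total_tails = 0
--     # 각 행의 뒷면(T)의 개수를 최소화하여 합산
--     for i in range(n):
--         row_tails = 0
--         for j in range(n):
--             row_tails += coin[i][j]  # 각 행의 T 개수 계산
--         # 각 행에 대해 최소값 선택 (T 개수 vs H 개수)
--         total_tails += min(row_tails, n - row_tails)
--     return total_tails
--
-- def turn_column(coin, col, n):
--     # 특정 열의 모든 값을 뒤집음 (1 -> 0, 0 -> 1)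
--     for i in range(n):
--         coin[i][col] ^= 1
--
-- def solution(coin):
--     n = len(coin)
--     min_tails = float('INF')  # 최소 뒷면 개수를 무한대로 초기화
--
--     # 각 비트 조합마다 열을 뒤집는 경우의 수를 고려 (2^n개의 조합 탐색)
--     for bit in range(1 << n):
--         copy_coin = [row[:] for row in coin]  # 원본 배열 복사
--
--         # 비트가 설정된 열만 뒤집기
--         for j in range(n):
--             if bit & (1 << j):  # bit의 j번째 비트가 1인지 확인
--                 turn_column(copy_coin, j, n)
--
--         # 뒤집은 행렬에서 최소 뒷면(T) 개수를 계산
--         min_tails = min(min_tails, count_tails(copy_coin, n))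
--
--     return min_tails
-- ===== SOURCE B (Python) =====
-- def solution(coin):
--     n = len(coin)
--     # Per-row precomputation: plain sum of the first n entries, and a bitmask of
--     # their parities (bit j set iff row[j] is odd).
--     base = [sum(row[j] for j in range(n)) for row in coin]
--     par = [sum((row[j] % 2) << j for j in range(n)) for row in coin]
--     best = None
--     for mask in range(1 << n):
--         pm = bin(mask).count("1")
--         total = 0
--         for i in range(n):
--             # Row sum after flipping the columns in `mask`:
--             # flipping c with c ^ 1 adds 1 on even c and subtracts 1 on odd c.
--             s = base[i] + pm - 2 * bin(mask & par[i]).count("1")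
--             total += min(s, n - s)
--         if best is None or total < best:
--             best = total
--     return best
-- ===== Notes on version B (the rewrite author's own statement) =====
-- stated objective: faster
-- what changed: Instead of copying the whole matrix and re-flipping and re-summing it for each of the 2^n column-flip masks, B precomputes each row's sum and a parity bitmask once and evaluates every mask with popcounts (row sum after flips = base + popcount(mask) - 2*popcount(mask & parity)).
import Mathlib
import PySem

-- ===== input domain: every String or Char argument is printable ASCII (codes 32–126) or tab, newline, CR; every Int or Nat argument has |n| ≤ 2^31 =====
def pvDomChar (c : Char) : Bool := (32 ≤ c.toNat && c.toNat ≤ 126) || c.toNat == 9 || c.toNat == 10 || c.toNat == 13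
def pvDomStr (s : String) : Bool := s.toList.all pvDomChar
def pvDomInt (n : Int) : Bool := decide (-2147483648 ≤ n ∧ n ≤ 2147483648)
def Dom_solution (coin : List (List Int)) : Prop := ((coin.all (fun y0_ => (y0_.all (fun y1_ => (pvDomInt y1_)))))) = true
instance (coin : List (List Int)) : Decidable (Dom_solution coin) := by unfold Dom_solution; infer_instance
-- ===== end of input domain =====

-- B replaces A's copy-flip-recount of the whole matrix per flip combination by per-row
-- precomputed sums and parity bitmasks, combined per mask with popcounts (objective: faster).
-- A does not mutate its argument (it copies each row), so return-value equivalence is full equivalence.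

-- ===== PORT A =====
-- list indices below come from range(...) and are nonnegative; Python raises IndexError
-- out of range (excluded by Pre_solution), so `List.getD`/`List.set` are exact here.
def turnColumn (c : List (List Int)) (col : Nat) (n : Nat) : List (List Int) :=
  (List.range n).foldl
    (fun m i => m.set i ((m.getD i []).set col (PySem.Int.bxor ((m.getD i []).getD col 0) 1))) c

def countTails (c : List (List Int)) (n : Nat) : Int :=
  (List.range n).foldl (fun tot i =>
    let rowTails := (List.range n).foldl (fun rt j => rt + ((c.getD i []).getD j 0)) 0
    tot + min rowTails ((n : Int) - rowTails)) 0

def solution (coin : List (List Int)) : Int :=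
  let n := coin.length
  ((List.range (2 ^ n)).foldl
    (fun (minTails : Option Int) bit =>
      let copyCoin := coin.map (fun row => row)       -- [row[:] for row in coin]
      let flipped := (List.range n).foldl
        (fun c j => if bit &&& (1 <<< j) ≠ 0 then turnColumn c j n else c) copyCoin
      some (match minTails with
            | none => countTails flipped n            -- min(float('INF'), x) = x
            | some v => min v (countTails flipped n))) none).getD 0

-- ===== PORT B =====
-- base[i] = sum(row[j] for j in range(n)); par[i] = sum((row[j] % 2) << j for j in range(n))
def rowBase (row : List Int) (n : Nat) : Int :=
  (List.range n).foldl (fun s j => s + row.getD j 0) 0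

def rowPar (row : List Int) (n : Nat) : Int :=
  (List.range n).foldl (fun p j => p + (PySem.Int.mod (row.getD j 0) 2) <<< j) 0

-- bin(x).count("1") on a nonnegative int is its popcount, PySem.Int.bitCount
def solution_alt (coin : List (List Int)) : Int :=
  let n := coin.length
  let base := coin.map (fun row => rowBase row n)
  let par := coin.map (fun row => rowPar row n)
  ((List.range (2 ^ n)).foldl
    (fun (best : Option Int) (mask : Nat) =>
      let pm : Int := PySem.Int.bitCount (mask : Int)
      let total := (List.range n).foldl
        (fun tot i =>
          let s : Int := base.getD i 0 + pm -
            2 * PySem.Int.bitCount (PySem.Int.band (mask : Int) (par.getD i 0))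
          tot + min s ((n : Int) - s)) 0
      some (match best with
            | none => total
            | some b => if total < b then total else b)) none).getD 0

-- ===== PRECONDITION & SPEC =====
-- Pre_ excludes exactly the ragged inputs where some row is shorter than the number of
-- rows: there A raises IndexError (coin[i][j] with j up to len(coin)-1).
def Pre_solution (coin : List (List Int)) : Prop :=
  ∀ row ∈ coin, coin.length ≤ row.length
instance (coin : List (List Int)) : Decidable (Pre_solution coin) := by
  unfold Pre_solution; infer_instance

def pvWitness_solution : List (List Int) := [[1, 0], [0, 1]]

def Spec_solution (coin : List (List Int)) (out : Int) : Prop := out = solution_alt coin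
instance (coin : List (List Int)) (out : Int) : Decidable (Spec_solution coin out) := by
  unfold Spec_solution; infer_instance

-- ===== CLAIM (what is proved, stated in full; the proofs are below) =====
def Claim_equal_solution : Prop :=
  ∀ (coin : List (List Int)), Dom_solution coin → Pre_solution coin →
    Spec_solution coin (solution coin)

-- ===== LEMMAS AND PROOFS =====

-- Python's c ^ 1 in arithmetic form: +1 on even c, -1 on odd c.
theorem pv_xor1_even (k : Nat) : (2*k) ^^^ 1 = 2*k+1 := by
  simpa [Nat.bit] using Nat.xor_bit false k true 0

theorem pv_xor1_odd (k : Nat) : (2*k+1) ^^^ 1 = 2*k := by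
  simpa [Nat.bit] using Nat.xor_bit true k true 0

theorem pv_xor1 (m : Nat) : (m ^^^ 1) = 2*(m/2) + (1 - m % 2) := by
  rcases Nat.even_or_odd m with ⟨k, hk⟩ | ⟨k, hk⟩ <;> subst hk
  · rw [show k + k = 2*k by omega, pv_xor1_even]; omega
  · rw [pv_xor1_odd]; omega

theorem pv_bxor_one (c : Int) : PySem.Int.bxor c 1 = c + 1 - 2 * PySem.Int.mod c 2 := by
  rw [PySem.Int.mod_eq_emod_of_pos (by norm_num)]
  unfold PySem.Int.bxor
  by_cases h : 0 ≤ c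
  · simp only [h, (by norm_num : (0:Int) ≤ 1), if_pos]
    rw [show (1:Int).toNat = 1 from rfl, pv_xor1 c.toNat]; omega
  · simp only [h, (by norm_num : (0:Int) ≤ 1), if_pos, if_neg, not_false_iff]
    rw [show (1:Int).toNat = 1 from rfl, pv_xor1 (-c-1).toNat]; omega

-- bitCount of a Nat below 2^n is the sum of its first n bits
theorem pv_bitCount_sum (n : Nat) : ∀ m : Nat, m < 2^n →
    (PySem.Int.bitCount (m : Int)) = ∑ j ∈ Finset.range n, (m.testBit j).toNat := by
  induction n with
  | zero =>
    intro m hm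
    interval_cases m
    simp [PySem.Int.bitCount_zero]
  | succ n ih =>
    intro m hm
    rcases Nat.eq_zero_or_pos m with rfl | hpos
    · simp [Nat.zero_testBit, PySem.Int.bitCount_zero]
    · rw [PySem.Int.bitCount_natCast hpos, Finset.sum_range_succ']
      have h2 : m / 2 < 2^n := by
        have : (2:Nat)^(n+1) = 2 * 2^n := by ring
        omega
      rw [ih (m/2) h2]
      simp only [Nat.testBit_add_one, Nat.testBit_zero]
      rcases Nat.mod_two_eq_zero_or_one m with h | h <;> rw [h] <;> simp <;> omega
theorem pv_bits_sum (b : Nat → Nat) (hb : ∀ j, b j ≤ 1) (n : Nat) :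
    (∑ j ∈ Finset.range n, b j * 2^j) < 2^n ∧
    ∀ j < n, (∑ j ∈ Finset.range n, b j * 2^j).testBit j = decide (b j = 1) := by
  induction n with
  | zero => simp
  | succ n ih =>
    obtain ⟨ihb, iht⟩ := ih
    rw [Finset.sum_range_succ]
    have hpow : (2:Nat)^(n+1) = 2 * 2^n := by ring
    have hbn := hb n
    have he : b n * 2 ^ n ≤ 1 * 2 ^ n := Nat.mul_le_mul_right _ hbn
    constructor
    · omega
    · intro j hj
      rcases Nat.lt_or_ge j n with hjn | hjn
      · rcases Nat.eq_zero_or_pos (b n) with h0 | h1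
        · simp [h0, iht j hjn]
        · have hb1 : b n = 1 := by omega
          rw [hb1, one_mul, add_comm, Nat.testBit_two_pow_add_gt hjn, iht j hjn]
      · have hj' : j = n := by omega
        rw [hj']
        rcases Nat.eq_zero_or_pos (b n) with h0 | h1
        · simp [h0, Nat.testBit_lt_two_pow ihb]
        · have hb1 : b n = 1 := by omega
          rw [hb1, one_mul, add_comm, Nat.testBit_two_pow_add_eq, Nat.testBit_lt_two_pow ihb]
          simp


-- fold of additions = Finset sum
theorem pv_sum_foldl (f : Nat → Int) (k : Nat) (a : Int) :
    (List.range k).foldl (fun s j => s + f j) a = a + ∑ j ∈ Finset.range k, f j := by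
  induction k generalizing a with
  | zero => simp
  | succ k ih => rw [List.range_succ, List.foldl_append, Finset.sum_range_succ, ih]; simp; ring

-- the A-side flip condition is a bit test
theorem pv_cond_testBit (mask j : Nat) : (mask &&& (1 <<< j) ≠ 0) ↔ mask.testBit j = true := by
  rw [Nat.shiftLeft_eq, one_mul, Nat.and_two_pow]
  rcases h : mask.testBit j <;> simp


-- getD through set / map, at an in-range index
theorem pv_getD_set {α : Type} (l : List α) (i j : Nat) (v d : α) (hi : i < l.length) :
    (l.set i v).getD j d = if j = i then v else l.getD j d := by
  rcases Nat.lt_or_ge j l.length with hj | hj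
  · rw [List.getD_eq_getElem _ _ (by simpa using hj), List.getElem_set]
    by_cases h : j = i
    · simp [h]
    · rw [if_neg (fun hh => h hh.symm), if_neg h, List.getD_eq_getElem _ _ hj]
  · rw [List.getD_eq_default _ _ (by simpa using hj), List.getD_eq_default _ _ hj,
      if_neg (by omega)]

theorem pv_getD_map {α β : Type} (f : α → β) (l : List α) (i : Nat) (d' : β) (d : α)
    (hi : i < l.length) : (l.map f).getD i d' = f (l.getD i d) := by
  rw [List.getD_eq_getElem _ _ (by simpa using hi), List.getD_eq_getElem _ _ hi,
    List.getElem_map]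

theorem pv_foldl_set_length (g : List (List Int) → Nat → List Int) :
    ∀ (l : List Nat) (c : List (List Int)),
      (l.foldl (fun m i => m.set i (g m i)) c).length = c.length := by
  intro l
  induction l with
  | nil => intro c; rfl
  | cons x xs ih => intro c; rw [List.foldl_cons]; rw [ih]; simp

-- the row-level form of turn_column
def fRow (col : Nat) (row : List Int) : List Int :=
  row.set col (PySem.Int.bxor (row.getD col 0) 1)

theorem pv_turnColumn_aux (col : Nat) : ∀ (k : Nat) (c : List (List Int)), k ≤ c.length →
    ∀ (j : Nat), j < c.length →
    (((List.range k).foldl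
        (fun m i => m.set i ((m.getD i []).set col (PySem.Int.bxor ((m.getD i []).getD col 0) 1))) c).getD j []) =
      if j < k then fRow col (c.getD j []) else c.getD j [] := by
  intro k
  induction k with
  | zero => intro c _ j hj; simp
  | succ k ih =>
    intro c hk j hj
    rw [List.range_succ, List.foldl_append, List.foldl_cons, List.foldl_nil]
    have hlen : (((List.range k).foldl
        (fun m i => m.set i ((m.getD i []).set col (PySem.Int.bxor ((m.getD i []).getD col 0) 1))) c)).length = c.length :=
      pv_foldl_set_length _ (List.range k) c
    rw [pv_getD_set _ _ _ _ _ (by omega)]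
    by_cases hjk : j = k
    · subst hjk
      rw [if_pos (by omega), ih c (by omega) j hj, if_neg (by omega)]
      simp [fRow]
    · rw [if_neg hjk, ih c (by omega) j hj]
      by_cases h2 : j < k
      · rw [if_pos h2, if_pos (by omega)]
      · rw [if_neg h2, if_neg (by omega)]

theorem pv_turnColumn_length (c : List (List Int)) (col n : Nat) :
    (turnColumn c col n).length = c.length := by
  unfold turnColumn
  exact pv_foldl_set_length _ (List.range n) c

theorem pv_turnColumn_eq (c : List (List Int)) (col : Nat) :
    turnColumn c col c.length = c.map (fRow col) := by
  apply List.ext_getElem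
  · rw [pv_turnColumn_length]; simp
  · intro i h1 h2
    have hi : i < c.length := by rw [pv_turnColumn_length] at h1; exact h1
    have hA : (turnColumn c col c.length)[i] = (turnColumn c col c.length).getD i [] := by
      rw [List.getD_eq_getElem _ _ (by simpa using h1)]
    rw [hA]
    unfold turnColumn
    rw [pv_turnColumn_aux col c.length c le_rfl i hi, if_pos hi, List.getElem_map,
      List.getD_eq_getElem _ _ hi]

-- row-level form of the per-mask column-flip loop
def rowFlip (bit : Nat) (cols : List Nat) (row : List Int) : List Int :=
  cols.foldl (fun r j => if bit &&& (1 <<< j) ≠ 0 then fRow j r else r) row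

theorem pv_flips_eq (bit n : Nat) : ∀ (cols : List Nat) (c : List (List Int)), c.length = n →
    cols.foldl (fun m j => if bit &&& (1 <<< j) ≠ 0 then turnColumn m j n else m) c =
      c.map (rowFlip bit cols) := by
  intro cols
  induction cols with
  | nil =>
    intro c _
    symm
    calc List.map (rowFlip bit []) c = List.map id c := List.map_congr_left (fun a _ => rfl)
      _ = c := List.map_id c
  | cons x xs ih =>
    intro c hc
    rw [List.foldl_cons]
    have hstep : (if bit &&& (1 <<< x) ≠ 0 then turnColumn c x n else c) =
        c.map (fun r => if bit &&& (1 <<< x) ≠ 0 then fRow x r else r) := by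
      by_cases h : bit &&& (1 <<< x) ≠ 0
      · rw [if_pos h, ← hc, pv_turnColumn_eq]
        simp [h]
      · rw [if_neg h]
        simp [h]
    rw [hstep, ih _ (by simpa using hc), List.map_map]
    rfl

theorem pv_rowFlip_length (bit : Nat) (cols : List Nat) (row : List Int) :
    (rowFlip bit cols row).length = row.length := by
  unfold rowFlip
  induction cols generalizing row with
  | nil => rfl
  | cons x xs ih => rw [List.foldl_cons]; rw [ih]; by_cases h : bit &&& (1 <<< x) ≠ 0 <;>
      simp [h, fRow]

theorem pv_rowFlip_getD (bit : Nat) : ∀ (k : Nat) (r : List Int), k ≤ r.length →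
    ∀ (j : Nat), j < r.length →
    (rowFlip bit (List.range k) r).getD j 0 =
      if j < k ∧ bit &&& (1 <<< j) ≠ 0 then PySem.Int.bxor (r.getD j 0) 1 else r.getD j 0 := by
  intro k
  induction k with
  | zero => intro r _ j hj; simp [rowFlip]
  | succ k ih =>
    intro r hk j hj
    unfold rowFlip
    rw [List.range_succ, List.foldl_append, List.foldl_cons, List.foldl_nil]
    have hF := ih r (by omega)
    have hlen : (rowFlip bit (List.range k) r).length = r.length := pv_rowFlip_length ..
    by_cases hx : bit &&& (1 <<< k) ≠ 0
    · rw [if_pos hx]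
      show (fRow k (rowFlip bit (List.range k) r)).getD j 0 = _
      unfold fRow
      rw [pv_getD_set _ _ _ _ _ (by omega)]
      by_cases hjk : j = k
      · subst hjk
        rw [if_pos rfl, hF j hj, if_neg (fun h => lt_irrefl j h.1), if_pos ⟨by omega, hx⟩]
      · rw [if_neg hjk, hF j hj]
        by_cases h2 : j < k ∧ bit &&& (1 <<< j) ≠ 0
        · obtain ⟨h21, h22⟩ := h2
          have hlt : j < k + 1 := by omega
          rw [if_pos ⟨h21, h22⟩, if_pos ⟨hlt, h22⟩]
        · rw [if_neg h2, if_neg (by rintro ⟨h3, h4⟩; exact h2 ⟨by omega, h4⟩)]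
    · rw [if_neg hx]
      show (rowFlip bit (List.range k) r).getD j 0 = _
      rw [hF j hj]
      by_cases h2 : j < k ∧ bit &&& (1 <<< j) ≠ 0
      · obtain ⟨h21, h22⟩ := h2
        have hlt : j < k + 1 := by omega
        rw [if_pos ⟨h21, h22⟩, if_pos ⟨hlt, h22⟩]
      · rw [if_neg h2, if_neg (fun hc => by
          rcases Nat.lt_or_ge j k with h5 | h5
          · exact h2 ⟨h5, hc.2⟩
          · have hkj : k = j := by omega
            rw [hkj] at hx
            exact hx hc.2)]

-- row-level arithmetic: value, bound and bits of the parity mask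
def parN (r : List Int) (n : Nat) : Nat :=
  ∑ j ∈ Finset.range n, (PySem.Int.mod (r.getD j 0) 2).toNat * 2^j

theorem pv_mod2_cast (c : Int) : PySem.Int.mod c 2 = ((PySem.Int.mod c 2).toNat : Int) := by
  rcases PySem.Int.mod_two_eq c with h | h <;> rw [h] <;> rfl

theorem pv_mod2_le (c : Int) : (PySem.Int.mod c 2).toNat ≤ 1 := by
  rcases PySem.Int.mod_two_eq c with h | h <;> rw [h] <;> decide

theorem pv_rowBase_sum (r : List Int) (n : Nat) :
    rowBase r n = ∑ j ∈ Finset.range n, r.getD j 0 := by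
  unfold rowBase; rw [pv_sum_foldl]; ring

theorem pv_rowPar_eq (r : List Int) (n : Nat) : rowPar r n = (parN r n : Int) := by
  unfold rowPar parN
  rw [pv_sum_foldl, zero_add]
  push_cast
  apply Finset.sum_congr rfl
  intro j _
  rw [Int.shiftLeft_eq, ← pv_mod2_cast]

theorem pv_parN_lt (r : List Int) (n : Nat) : parN r n < 2^n :=
  (pv_bits_sum _ (fun j => pv_mod2_le (r.getD j 0)) n).1

theorem pv_parN_testBit (r : List Int) (n : Nat) (j : Nat) (hj : j < n) :
    (parN r n).testBit j = decide (PySem.Int.mod (r.getD j 0) 2 = 1) := by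
  unfold parN
  rw [(pv_bits_sum _ (fun j => pv_mod2_le (r.getD j 0)) n).2 j hj]
  rcases PySem.Int.mod_two_eq (r.getD j 0) with h | h <;> rw [h] <;> rfl

-- the per-row key identity: flipped row sum from base sum, popcounts and the parity mask
theorem pv_row_key (r : List Int) (n : Nat) (mask : Nat) (hm : mask < 2^n) :
    (∑ j ∈ Finset.range n,
      (if mask &&& (1 <<< j) ≠ 0 then PySem.Int.bxor (r.getD j 0) 1 else r.getD j 0))
    = rowBase r n + ((PySem.Int.bitCount (mask : Int) : Nat) : Int)
      - 2 * ((PySem.Int.bitCount (PySem.Int.band (mask : Int) (rowPar r n)) : Nat) : Int) := by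
  have hband : PySem.Int.band (mask : Int) (rowPar r n) = ((mask &&& parN r n : Nat) : Int) := by
    rw [pv_rowPar_eq, PySem.Int.band_natCast]
  rw [hband, pv_rowBase_sum, pv_bitCount_sum n mask hm,
    pv_bitCount_sum n _ (lt_of_le_of_lt Nat.and_le_right (pv_parN_lt r n))]
  have hterm : ∀ j ∈ Finset.range n,
      (if mask &&& (1 <<< j) ≠ 0 then PySem.Int.bxor (r.getD j 0) 1 else r.getD j 0)
      = r.getD j 0 + ((mask.testBit j).toNat : Int)
        - 2 * (((mask &&& parN r n).testBit j).toNat : Int) := by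
    intro j hj
    rw [Nat.testBit_land, pv_parN_testBit r n j (Finset.mem_range.mp hj)]
    by_cases hb : mask.testBit j = true
    · rw [if_pos ((pv_cond_testBit mask j).mpr hb), pv_bxor_one, hb]
      rcases PySem.Int.mod_two_eq (r.getD j 0) with h | h <;> rw [h] <;> simp
    · rw [if_neg (fun hc => hb ((pv_cond_testBit mask j).mp hc))]
      rw [Bool.not_eq_true] at hb
      rw [hb]
      simp
  rw [Finset.sum_congr rfl hterm, Finset.sum_sub_distrib, Finset.sum_add_distrib,
    ← Finset.mul_sum]
  push_cast
  ring

-- the per-mask values of the two programs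
def pvFA (coin : List (List Int)) (bit : Nat) : Int :=
  countTails ((List.range coin.length).foldl
    (fun c j => if bit &&& (1 <<< j) ≠ 0 then turnColumn c j coin.length else c)
    (coin.map (fun row => row))) coin.length

def pvFB (coin : List (List Int)) (mask : Nat) : Int :=
  (List.range coin.length).foldl (fun tot i =>
    let s : Int := (coin.map (fun row => rowBase row coin.length)).getD i 0
      + ((PySem.Int.bitCount (mask : Int) : Nat) : Int)
      - 2 * ((PySem.Int.bitCount (PySem.Int.band (mask : Int)
          ((coin.map (fun row => rowPar row coin.length)).getD i 0)) : Nat) : Int)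
    tot + min s ((coin.length : Int) - s)) 0

theorem pv_countTails_sum (c : List (List Int)) (n : Nat) :
    countTails c n = ∑ i ∈ Finset.range n,
      (min (∑ j ∈ Finset.range n, (c.getD i []).getD j 0)
        ((n : Int) - ∑ j ∈ Finset.range n, (c.getD i []).getD j 0)) := by
  unfold countTails
  have hbody : (fun (tot : Int) i =>
      let rowTails := (List.range n).foldl (fun rt j => rt + ((c.getD i []).getD j 0)) 0
      tot + min rowTails ((n : Int) - rowTails)) =
      (fun (tot : Int) i => tot +
        (min (∑ j ∈ Finset.range n, (c.getD i []).getD j 0)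
          ((n : Int) - ∑ j ∈ Finset.range n, (c.getD i []).getD j 0))) := by
    funext tot i
    show tot + min ((List.range n).foldl (fun rt j => rt + ((c.getD i []).getD j 0)) 0)
        ((n : Int) - (List.range n).foldl (fun rt j => rt + ((c.getD i []).getD j 0)) 0) = _
    rw [pv_sum_foldl, zero_add]
  rw [hbody, pv_sum_foldl, zero_add]

theorem pv_TA_TB (coin : List (List Int)) (hpre : Pre_solution coin) (bit : Nat)
    (hb : bit < 2^coin.length) : pvFA coin bit = pvFB coin bit := by
  have hrowlen : ∀ i, i < coin.length → coin.length ≤ (coin.getD i []).length := by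
    intro i hi
    apply hpre
    rw [List.getD_eq_getElem _ _ hi]
    exact List.getElem_mem hi
  have hmapid : coin.map (fun row => row) = coin := by
    calc coin.map (fun row => row) = coin.map id := List.map_congr_left (fun a _ => rfl)
      _ = coin := List.map_id coin
  unfold pvFA
  rw [hmapid, pv_flips_eq bit coin.length (List.range coin.length) coin rfl,
    pv_countTails_sum]
  unfold pvFB
  have hbody : (fun (tot : Int) i =>
      let s : Int := (coin.map (fun row => rowBase row coin.length)).getD i 0
        + ((PySem.Int.bitCount (bit : Int) : Nat) : Int)
        - 2 * ((PySem.Int.bitCount (PySem.Int.band (bit : Int)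
            ((coin.map (fun row => rowPar row coin.length)).getD i 0)) : Nat) : Int)
      tot + min s ((coin.length : Int) - s)) =
      (fun (tot : Int) i => tot + min
        ((coin.map (fun row => rowBase row coin.length)).getD i 0
          + ((PySem.Int.bitCount (bit : Int) : Nat) : Int)
          - 2 * ((PySem.Int.bitCount (PySem.Int.band (bit : Int)
              ((coin.map (fun row => rowPar row coin.length)).getD i 0)) : Nat) : Int))
        ((coin.length : Int) -
          ((coin.map (fun row => rowBase row coin.length)).getD i 0
            + ((PySem.Int.bitCount (bit : Int) : Nat) : Int)
            - 2 * ((PySem.Int.bitCount (PySem.Int.band (bit : Int)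
                ((coin.map (fun row => rowPar row coin.length)).getD i 0)) : Nat) : Int)))) :=
    funext fun tot => funext fun i => rfl
  rw [hbody, pv_sum_foldl, zero_add]
  apply Finset.sum_congr rfl
  intro i hi
  have hi' : i < coin.length := Finset.mem_range.mp hi
  have hlen := hrowlen i hi'
  have hRow : ((coin.map (rowFlip bit (List.range coin.length))).getD i []) =
      rowFlip bit (List.range coin.length) (coin.getD i []) :=
    pv_getD_map _ _ _ _ [] hi'
  have hsum : (∑ j ∈ Finset.range coin.length,
      ((coin.map (rowFlip bit (List.range coin.length))).getD i []).getD j 0) =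
      rowBase (coin.getD i []) coin.length
        + ((PySem.Int.bitCount (bit : Int) : Nat) : Int)
        - 2 * ((PySem.Int.bitCount (PySem.Int.band (bit : Int)
            (rowPar (coin.getD i []) coin.length)) : Nat) : Int) := by
    rw [hRow, ← pv_row_key (coin.getD i []) coin.length bit hb]
    apply Finset.sum_congr rfl
    intro j hj
    have hj' : j < coin.length := Finset.mem_range.mp hj
    rw [pv_rowFlip_getD bit coin.length (coin.getD i []) hlen j (by omega)]
    by_cases hc : bit &&& (1 <<< j) ≠ 0
    · rw [if_pos ⟨hj', hc⟩, if_pos hc]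
    · rw [if_neg (fun h => hc h.2), if_neg hc]
  rw [hsum,
    pv_getD_map (fun row => rowBase row coin.length) coin i 0 [] hi',
    pv_getD_map (fun row => rowPar row coin.length) coin i 0 [] hi']

theorem pv_fold_min_eq (f g : Nat → Int) : ∀ (l : List Nat), (∀ m ∈ l, f m = g m) →
    ∀ (acc : Option Int),
    l.foldl (fun acc bit => some (match acc with
      | none => f bit
      | some v => min v (f bit))) acc
    = l.foldl (fun acc mask => some (match acc with
      | none => g mask
      | some b => if g mask < b then g mask else b)) acc := by
  intro l
  induction l with
  | nil => intro _ _; rfl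
  | cons x xs ih =>
    intro h acc
    rw [List.foldl_cons, List.foldl_cons]
    have hx := h x (List.mem_cons_self ..)
    have hstep : (some (match acc with
        | none => f x
        | some v => min v (f x)) : Option Int) = some (match acc with
        | none => g x
        | some b => if g x < b then g x else b) := by
      cases acc with
      | none => rw [hx]
      | some v =>
        simp only [Option.some.injEq]
        rw [hx, min_def]
        split_ifs <;> omega
    rw [hstep]
    exact ih (fun m hm => h m (List.mem_cons_of_mem _ hm)) _

-- ===== VERDICT (by name: the statement is the Claim_ definition above) =====
theorem solution_spec : Claim_equal_solution := by
  intro coin _ hpre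
  show solution coin = solution_alt coin
  have h := pv_fold_min_eq (pvFA coin) (pvFB coin) (List.range (2^coin.length))
    (fun m hm => pv_TA_TB coin hpre m (List.mem_range.mp hm)) none
  exact congrArg (fun o : Option Int => o.getD 0) h
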